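-- pv_equiv track=rewrite | github.com/ArdaAgacdelen/HU-AI-BBM103 | PA1/Sudoku Solver/Codes/sudoku.py | possible_value
-- ===== SOURCE A (Python) =====
-- def find_row(place):
--     """This function finds for given cell (numbered 1 to 81 (first from left to right,then downward)) which row it
--     belongs to. """
--     if place % 9 == 0:
--         return place // 9
--     else:
--         return (place // 9) + 1
--
-- def find_column(place):
--     """This function finds for given cell (numbered 1 to 81) which column it belongs to. """
--     if place % 9 == 0:
--         return 9
--     else:
--         return place % 9
--
-- def find_block(place):
--     """This function finds for given cell (numbered 1 to 81) which block it belongs to. """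
--     row = find_row(place)
--     column = find_column(place)
--     if row in [1, 2, 3]:
--         if column in [1, 2, 3]:
--             return 1
--         elif column in [4, 5, 6]:
--             return 2
--         else:
--             return 3
--
--     if row in [4, 5, 6]:
--         if column in [1, 2, 3]:
--             return 4
--         elif column in [4, 5, 6]:
--             return 5
--         else:
--             return 6
--
--     else :
--         if column in [1, 2, 3]:
--             return 7
--         elif column in [4, 5, 6]:
--             return 8
--         else:
--             return 9
--
-- def possible_value(place, rows_list, columns_list, blocks_list):
--     """This function returns a list that includes "possible values" for given cell (numbered 1 to 81) via checking which
--     digits are already exist in its row, column and block."""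
--     values_found = []
--     possible_values = []
--     if rows_list[find_row(place)-1][find_column(place)-1] == "0" :  # checking whether given cell is empty.
--         for i in range(1,10):
--             if str(i) in rows_list[find_row(place)-1]:
--                 values_found.append(str(i))                         # save existing digits in the same row.
--
--             elif str(i) in columns_list[find_column(place)-1]:
--                 values_found.append(str(i))                         # save existing digits in the same column.
--
--             elif str(i) in blocks_list[find_block(place)-1]:
--                 values_found.append(str(i))                         # save existing digits in the same block.
--
--         for i in range(1,10):
--             if not str(i) in values_found:
--                 possible_values.append(str(i))
--     return possible_values
-- ===== SOURCE B (Python) =====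
-- def find_row(place):
--     if place % 9 == 0:
--         return place // 9
--     else:
--         return (place // 9) + 1
--
-- def find_column(place):
--     if place % 9 == 0:
--         return 9
--     else:
--         return place % 9
--
-- def find_block(place):
--     row = find_row(place)
--     column = find_column(place)
--     if row in [1, 2, 3]:
--         if column in [1, 2, 3]:
--             return 1
--         elif column in [4, 5, 6]:
--             return 2
--         else:
--             return 3
--     if row in [4, 5, 6]:
--         if column in [1, 2, 3]:
--             return 4
--         elif column in [4, 5, 6]:
--             return 5
--         else:
--             return 6
--     else:
--         if column in [1, 2, 3]:
--             return 7
--         elif column in [4, 5, 6]: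
--             return 8
--         else:
--             return 9
--
-- def possible_value(place, rows_list, columns_list, blocks_list):
--     # Inverted traversal: instead of testing each digit 1..9 against the three
--     # lists, start with all nine candidate digits and delete every symbol seen
--     # during ONE pass over the concatenated row/column/block cells.
--     row = rows_list[find_row(place) - 1]
--     c = find_column(place) - 1
--     if row[c] != "0":
--         return []
--     candidates = [str(d) for d in range(1, 10)]
--     for sym in row + columns_list[c] + blocks_list[find_block(place) - 1]:
--         if sym in candidates:
--             candidates.remove(sym)
--     return candidates
-- ===== Notes on version B (the rewrite author's own statement) =====
-- stated objective: alternative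
-- what changed: B inverts the traversal: it starts from the nine candidate digits and makes ONE pass over the concatenated row+column+block cells, deleting each symbol it sees from the candidate list, instead of A's two staged passes that test every digit 1..9 by membership scans of the three lists.
import Mathlib
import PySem

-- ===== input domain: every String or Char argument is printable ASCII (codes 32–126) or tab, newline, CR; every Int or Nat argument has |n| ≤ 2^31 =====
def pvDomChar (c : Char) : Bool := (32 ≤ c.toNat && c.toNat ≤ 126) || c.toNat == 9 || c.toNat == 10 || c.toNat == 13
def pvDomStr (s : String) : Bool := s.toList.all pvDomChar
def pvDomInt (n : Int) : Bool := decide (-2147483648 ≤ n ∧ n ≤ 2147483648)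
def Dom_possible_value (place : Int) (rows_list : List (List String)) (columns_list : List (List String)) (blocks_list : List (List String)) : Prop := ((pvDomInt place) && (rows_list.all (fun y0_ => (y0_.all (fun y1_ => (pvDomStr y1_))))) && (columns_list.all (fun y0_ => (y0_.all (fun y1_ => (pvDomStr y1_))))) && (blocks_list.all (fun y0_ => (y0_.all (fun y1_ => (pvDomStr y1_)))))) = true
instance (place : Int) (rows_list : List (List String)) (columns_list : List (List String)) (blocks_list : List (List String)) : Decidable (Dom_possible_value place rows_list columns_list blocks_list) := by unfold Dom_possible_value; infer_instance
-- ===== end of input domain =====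

-- B inverts the traversal: one pass over the concatenated row+column+block cells deleting each seen symbol from a
-- nine-candidate digit list, instead of A's two staged per-digit membership scans (same return value; no mutation
-- of the arguments is observable in either version).

-- ===== PORT A =====
def find_row (place : Int) : Int :=
  if PySem.Int.mod place 9 = 0 then PySem.Int.floordiv place 9
  else PySem.Int.floordiv place 9 + 1

def find_column (place : Int) : Int :=
  if PySem.Int.mod place 9 = 0 then 9 else PySem.Int.mod place 9

def find_block (place : Int) : Int :=
  let row := find_row place
  let column := find_column place
  if row ∈ [(1 : Int), 2, 3] then
    (if column ∈ [(1 : Int), 2, 3] then 1 else if column ∈ [(4 : Int), 5, 6] then 2 else 3)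
  else if row ∈ [(4 : Int), 5, 6] then
    (if column ∈ [(1 : Int), 2, 3] then 4 else if column ∈ [(4 : Int), 5, 6] then 5 else 6)
  else
    (if column ∈ [(1 : Int), 2, 3] then 7 else if column ∈ [(4 : Int), 5, 6] then 8 else 9)

-- indexing is total via pyGetD; Pre_possible_value restricts to the inputs where every access Python performs is in range
def possible_value (place : Int) (rows_list : List (List String)) (columns_list : List (List String)) (blocks_list : List (List String)) : List String :=
  let values_found : List String := []
  let possible_values : List String := []
  if PySem.List.pyGetD (PySem.List.pyGetD rows_list (find_row place - 1) []) (find_column place - 1) "" = "0" then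
    let values_found := (PySem.List.pyRange 1 10 1).foldl (fun acc i =>
      if PySem.Int.toStr i ∈ PySem.List.pyGetD rows_list (find_row place - 1) [] then acc ++ [PySem.Int.toStr i]
      else if PySem.Int.toStr i ∈ PySem.List.pyGetD columns_list (find_column place - 1) [] then acc ++ [PySem.Int.toStr i]
      else if PySem.Int.toStr i ∈ PySem.List.pyGetD blocks_list (find_block place - 1) [] then acc ++ [PySem.Int.toStr i]
      else acc) values_found
    (PySem.List.pyRange 1 10 1).foldl (fun acc i =>
      if ¬ (PySem.Int.toStr i ∈ values_found) then acc ++ [PySem.Int.toStr i] else acc) possible_values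
  else possible_values

-- ===== PORT B =====
-- Python list.remove deletes the first occurrence and is only called under the membership guard,
-- so 'if sym ∈ cand then cand.erase sym else cand' is exact.
def possible_value_alt (place : Int) (rows_list : List (List String)) (columns_list : List (List String)) (blocks_list : List (List String)) : List String :=
  let row := PySem.List.pyGetD rows_list (find_row place - 1) []
  let c := find_column place - 1
  if PySem.List.pyGetD row c "" ≠ "0" then []
  else
    let candidates := (PySem.List.pyRange 1 10 1).map PySem.Int.toStr
    (row ++ PySem.List.pyGetD columns_list c [] ++ PySem.List.pyGetD blocks_list (find_block place - 1) []).foldl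
      (fun cand sym => if sym ∈ cand then cand.erase sym else cand) candidates

-- ===== PRECONDITION & SPEC =====
-- Pre_ requires every index Python may take to be in range; it is slightly narrower than A's exact domain: when the
-- cell is "0" it always requires columns_list/blocks_list to be indexable, while A skips those accesses (returning [])
-- in the rare case that the row (or row plus column) already contains all nine digits — B indexes them and raises there.
def Pre_possible_value (place : Int) (rows_list : List (List String)) (columns_list : List (List String)) (blocks_list : List (List String)) : Prop :=
  PySem.Raise.InRange rows_list.length (find_row place - 1) ∧
  PySem.Raise.InRange (PySem.List.pyGetD rows_list (find_row place - 1) []).length (find_column place - 1) ∧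
  (PySem.List.pyGetD (PySem.List.pyGetD rows_list (find_row place - 1) []) (find_column place - 1) "" = "0" →
    PySem.Raise.InRange columns_list.length (find_column place - 1) ∧
    PySem.Raise.InRange blocks_list.length (find_block place - 1))
instance (place : Int) (rows_list : List (List String)) (columns_list : List (List String)) (blocks_list : List (List String)) : Decidable (Pre_possible_value place rows_list columns_list blocks_list) := by unfold Pre_possible_value; infer_instance

def pvWitness_possible_value : Int × List (List String) × List (List String) × List (List String) :=
  (1, [["0"]], [[]], [[]])

def Spec_possible_value (place : Int) (rows_list : List (List String)) (columns_list : List (List String)) (blocks_list : List (List String)) (out : List String) : Prop := out = possible_value_alt place rows_list columns_list blocks_list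
instance (place : Int) (rows_list : List (List String)) (columns_list : List (List String)) (blocks_list : List (List String)) (out : List String) : Decidable (Spec_possible_value place rows_list columns_list blocks_list out) := by unfold Spec_possible_value; infer_instance

-- ===== CLAIM =====
def Claim_equal_possible_value : Prop := ∀ (place : Int) (rows_list : List (List String)) (columns_list : List (List String)) (blocks_list : List (List String)), Dom_possible_value place rows_list columns_list blocks_list → Pre_possible_value place rows_list columns_list blocks_list → Spec_possible_value place rows_list columns_list blocks_list (possible_value place rows_list columns_list blocks_list)

-- ===== LEMMAS AND PROOFS =====

-- A's first loop is an append-if accumulator: its result is a filtered map of the digit range.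
theorem pv_found_eq (row col blk : List String) (init : List String) :
    (PySem.List.pyRange 1 10 1).foldl (fun acc i =>
      if PySem.Int.toStr i ∈ row then acc ++ [PySem.Int.toStr i]
      else if PySem.Int.toStr i ∈ col then acc ++ [PySem.Int.toStr i]
      else if PySem.Int.toStr i ∈ blk then acc ++ [PySem.Int.toStr i]
      else acc) init
    = init ++ ((PySem.List.pyRange 1 10 1).filter (fun i =>
        decide (PySem.Int.toStr i ∈ row ∨ PySem.Int.toStr i ∈ col ∨ PySem.Int.toStr i ∈ blk))).map PySem.Int.toStr := by
  have hf : (fun (acc : List String) i =>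
      if PySem.Int.toStr i ∈ row then acc ++ [PySem.Int.toStr i]
      else if PySem.Int.toStr i ∈ col then acc ++ [PySem.Int.toStr i]
      else if PySem.Int.toStr i ∈ blk then acc ++ [PySem.Int.toStr i]
      else acc)
      = (fun acc i => if (fun i => decide (PySem.Int.toStr i ∈ row ∨ PySem.Int.toStr i ∈ col ∨ PySem.Int.toStr i ∈ blk)) i = true
          then acc ++ [PySem.Int.toStr i] else acc) := by
    funext acc i
    by_cases h1 : PySem.Int.toStr i ∈ row <;> by_cases h2 : PySem.Int.toStr i ∈ col <;>
      by_cases h3 : PySem.Int.toStr i ∈ blk <;> simp [h1, h2, h3]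
  rw [hf, PySem.List.foldl_append_if]

-- A's second loop likewise.
theorem pv_out_eq (vf : List String) (init : List String) :
    (PySem.List.pyRange 1 10 1).foldl (fun acc i =>
      if ¬ (PySem.Int.toStr i ∈ vf) then acc ++ [PySem.Int.toStr i] else acc) init
    = init ++ ((PySem.List.pyRange 1 10 1).filter (fun i => decide (PySem.Int.toStr i ∉ vf))).map PySem.Int.toStr := by
  have hf : (fun (acc : List String) i =>
      if ¬ (PySem.Int.toStr i ∈ vf) then acc ++ [PySem.Int.toStr i] else acc)
      = (fun acc i => if (fun i => decide (PySem.Int.toStr i ∉ vf)) i = true then acc ++ [PySem.Int.toStr i] else acc) := by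
    funext acc i; by_cases h : PySem.Int.toStr i ∈ vf <;> simp [h]
  rw [hf, PySem.List.foldl_append_if]

-- str is injective on the digits 1..9.
theorem pv_toStr_inj : ∀ i ∈ PySem.List.pyRange 1 10 1, ∀ j ∈ PySem.List.pyRange 1 10 1,
    PySem.Int.toStr i = PySem.Int.toStr j → i = j := by decide

-- membership of str(j) in the filtered map is the condition at j itself
theorem pv_mem_found (p : Int → Prop) [DecidablePred p] (j : Int) (hj : j ∈ PySem.List.pyRange 1 10 1) :
    (PySem.Int.toStr j ∈ ((PySem.List.pyRange 1 10 1).filter (fun i => decide (p i))).map PySem.Int.toStr) ↔ p j := by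
  simp only [List.mem_map, List.mem_filter, decide_eq_true_eq]
  constructor
  · rintro ⟨i, ⟨hi, hpi⟩, hstr⟩
    exact (pv_toStr_inj i hi j hj hstr) ▸ hpi
  · exact fun h => ⟨j, ⟨hj, h⟩, rfl⟩

-- B's deletion loop over a duplicate-free candidate list keeps exactly the candidates not among the scanned symbols.
theorem pv_erase_fold (syms : List String) : ∀ (L : List String), L.Nodup →
    syms.foldl (fun cand sym => if sym ∈ cand then cand.erase sym else cand) L
      = L.filter (fun x => decide (x ∉ syms)) := by
  induction syms with
  | nil => intro L _; simp
  | cons s rest ih =>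
    intro L hL
    have hstep : (if s ∈ L then L.erase s else L) = L.filter (fun x => decide (x ≠ s)) := by
      by_cases h : s ∈ L
      · simp only [h, if_true]
        rw [List.Nodup.erase_eq_filter hL]
        apply List.filter_congr; intro x _; by_cases hx : x = s <;> simp [hx]
      · simp only [h, if_false]
        refine (List.filter_eq_self.mpr ?_).symm
        intro x hx
        simp only [decide_eq_true_eq]
        exact fun he => h (he ▸ hx)
    have hnd : (L.filter (fun x => decide (x ≠ s))).Nodup := hL.filter _
    simp only [List.foldl_cons, hstep, ih _ hnd, List.filter_filter]
    apply List.filter_congr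
    intro x _
    by_cases h1 : x = s <;> by_cases h2 : x ∈ rest <;> simp [h1, h2]

-- ===== VERDICT =====
theorem possible_value_spec : Claim_equal_possible_value := by
  intro place rows_list columns_list blocks_list _hDom _hPre
  unfold Spec_possible_value possible_value possible_value_alt
  by_cases hcell : PySem.List.pyGetD (PySem.List.pyGetD rows_list (find_row place - 1) []) (find_column place - 1) "" = "0"
  · simp only [hcell, if_pos, ne_eq, not_true_eq_false, if_false]
    rw [pv_found_eq, pv_out_eq, List.nil_append, List.nil_append]
    rw [pv_erase_fold _ _ (by decide)]
    rw [List.filter_map]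
    congr 1
    apply List.filter_congr
    intro i hi
    simp only [Function.comp, decide_eq_decide]
    rw [pv_mem_found (fun i => PySem.Int.toStr i ∈ PySem.List.pyGetD rows_list (find_row place - 1) [] ∨
        PySem.Int.toStr i ∈ PySem.List.pyGetD columns_list (find_column place - 1) [] ∨
        PySem.Int.toStr i ∈ PySem.List.pyGetD blocks_list (find_block place - 1) []) i hi]
    simp [List.mem_append]
  · simp [hcell]
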